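-- pv_equiv track=rewrite | github.com/Godototot/AoC25 | code/day4.py | calculate_space_count
-- ===== SOURCE A (Python) =====
-- def calculate_space_count(visual_grid):
--     size_x = len(visual_grid[0])
--     size_y = len(visual_grid)
--     grid = [[0] * size_x for i in range(size_y)]
--     for y, row in enumerate(visual_grid):
--         for x, space in enumerate(row):
--             if space == '@':
--                 if y > 0:
--                     if x > 0:
--                         grid[y - 1][x - 1] += 1
--                     if x < size_x - 1:
--                         grid[y - 1][x + 1] += 1
--                     grid[y - 1][x] += 1
--                 if y < size_y - 1:
--                     if x > 0:
--                         grid[y + 1][x - 1] += 1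
--                     if x < size_x - 1:
--                         grid[y + 1][x + 1] += 1
--                     grid[y + 1][x] += 1
--                 if x > 0:
--                     grid[y][x - 1] += 1
--                 if x < size_x - 1:
--                     grid[y][x + 1] += 1
--             else:
--                 grid[y][x] += 10
--     return grid
-- ===== SOURCE B (Python) =====
-- def calculate_space_count(visual_grid):
--     width = len(visual_grid[0])
--     marks = {(y, x)
--              for y, row in enumerate(visual_grid)
--              for x, c in enumerate(row) if c == '@'}
--     grid = [[sum((y + dy, x + dx) in marks
--                  for dy in (-1, 0, 1) for dx in (-1, 0, 1) if dy or dx)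
--              for x in range(width)]
--             for y in range(len(visual_grid))]
--     for y, row in enumerate(visual_grid):
--         for x, c in enumerate(row):
--             if c != '@':
--                 grid[y][x] += 10
--     return grid
-- ===== Notes on version B (the rewrite author's own statement) =====
-- stated objective: alternative
-- what changed: A pushes increments from each cell into a mutable grid (scatter stencil); B first collects the '@' coordinates into a set and then pulls each cell's value by counting set members among its 8 neighbours (gather stencil), adding 10 to non-'@' cells in a final pass; Pre_ excludes only the inputs where A raises IndexError (empty grid, or a row longer than the first).
import Mathlib
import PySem

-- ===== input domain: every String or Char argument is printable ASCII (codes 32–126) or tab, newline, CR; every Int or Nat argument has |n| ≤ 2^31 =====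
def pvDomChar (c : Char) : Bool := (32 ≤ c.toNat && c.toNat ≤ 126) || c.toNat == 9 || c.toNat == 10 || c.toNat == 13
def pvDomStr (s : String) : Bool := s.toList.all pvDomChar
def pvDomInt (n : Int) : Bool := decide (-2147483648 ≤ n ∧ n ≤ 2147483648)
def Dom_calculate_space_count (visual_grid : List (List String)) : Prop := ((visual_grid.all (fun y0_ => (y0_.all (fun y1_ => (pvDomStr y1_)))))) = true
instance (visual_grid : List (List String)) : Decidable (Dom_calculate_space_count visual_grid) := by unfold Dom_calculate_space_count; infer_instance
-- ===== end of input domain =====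

-- B replaces A's scatter (push) stencil by a different decomposition: it first collects the '@' coordinates into a set, then each output cell counts set members among its 8 neighbours (gather) and non-'@' cells get +10 in a final pass (alternative algorithm, same cost). A mutates only its own fresh list; return values are what is compared.


-- ===== PORT A =====
def pvBump (g : List (List Int)) (a b : Nat) (d : Int) : List (List Int) :=
  g.modify a (fun row => row.modify b (fun v => v + d))

def pvStepAt (sy sx : Nat) (g : List (List Int)) (y x : Nat) (s : String) : List (List Int) :=
  if s == "@" then
    let g1 := if 0 < y then
        let a := if 0 < x then pvBump g (y-1) (x-1) 1 else g
        let b := if x < sx - 1 then pvBump a (y-1) (x+1) 1 else a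
        pvBump b (y-1) x 1
      else g
    let g2 := if y < sy - 1 then
        let a := if 0 < x then pvBump g1 (y+1) (x-1) 1 else g1
        let b := if x < sx - 1 then pvBump a (y+1) (x+1) 1 else a
        pvBump b (y+1) x 1
      else g1
    let g3 := if 0 < x then pvBump g2 y (x-1) 1 else g2
    if x < sx - 1 then pvBump g3 y (x+1) 1 else g3
  else pvBump g y x 10

def calculate_space_count (visual_grid : List (List String)) : List (List Int) :=
  let size_x := (visual_grid.headD []).length
  let size_y := visual_grid.length
  let init := List.replicate size_y (List.replicate size_x (0 : Int))
  (visual_grid.zipIdx).foldl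
    (fun g p => (p.1.zipIdx).foldl (fun g' q => pvStepAt size_y size_x g' p.2 q.2 q.1) g) init

-- ===== PORT B =====
def pvDeltas : List (Int × Int) := [(-1,-1),(-1,0),(-1,1),(0,-1),(0,1),(1,-1),(1,0),(1,1)]

def pvMarks (visual_grid : List (List String)) : List (Int × Int) :=
  PySem.Set.ofList ((visual_grid.zipIdx).flatMap (fun p =>
    (p.1.zipIdx).filterMap (fun q =>
      if q.1 == "@" then some ((p.2 : Int), (q.2 : Int)) else none)))

def calculate_space_count_alt (visual_grid : List (List String)) : List (List Int) :=
  let width := (visual_grid.headD []).length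
  let marks := pvMarks visual_grid
  let grid := (List.range visual_grid.length).map (fun (y : Nat) =>
    (List.range width).map (fun (x : Nat) =>
      pvDeltas.foldl (fun acc d =>
        acc + (if marks.contains ((y : Int) + d.1, (x : Int) + d.2) then 1 else 0)) (0 : Int)))
  (visual_grid.zipIdx).foldl (fun g p =>
    (p.1.zipIdx).foldl (fun g' q =>
      if q.1 ≠ "@" then pvBump g' p.2 q.2 10 else g') g) grid

-- ===== PRECONDITION & SPEC =====
-- Pre_ excludes exactly the inputs on which A raises IndexError: the empty grid (visual_grid[0])
-- and grids with a row longer than the first (A writes past the end of the corresponding output row).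
def Pre_calculate_space_count (visual_grid : List (List String)) : Prop :=
  visual_grid ≠ [] ∧ ∀ row ∈ visual_grid, row.length ≤ (visual_grid.headD []).length
instance (visual_grid : List (List String)) : Decidable (Pre_calculate_space_count visual_grid) := by
  unfold Pre_calculate_space_count; infer_instance

def pvWitness_calculate_space_count : List (List String) := [["@", "."], [".", "@"]]

def Spec_calculate_space_count (visual_grid : List (List String)) (out : List (List Int)) : Prop := out = calculate_space_count_alt visual_grid
instance (visual_grid : List (List String)) (out : List (List Int)) : Decidable (Spec_calculate_space_count visual_grid out) := by unfold Spec_calculate_space_count; infer_instance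

-- ===== CLAIM (what is proved, stated in full; the proofs are below) =====
def Claim_equal_calculate_space_count : Prop := ∀ (visual_grid : List (List String)), Dom_calculate_space_count visual_grid → Pre_calculate_space_count visual_grid → Spec_calculate_space_count visual_grid (calculate_space_count visual_grid)

-- ===== LEMMAS AND PROOFS =====
def pvVal (g : List (List Int)) (y x : Nat) : Int := (g.getD y []).getD x 0

def pvShape (sy sx : Nat) (g : List (List Int)) : Prop :=
  g.length = sy ∧ ∀ i, i < sy → (g.getD i []).length = sx

def pvContrib (sy sx yc xc : Nat) (s : String) (y x : Nat) : Int :=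
  if s == "@" then
    (if 0 < yc ∧ 0 < xc ∧ yc-1 = y ∧ xc-1 = x then 1 else 0)
    + (if 0 < yc ∧ xc < sx-1 ∧ yc-1 = y ∧ xc+1 = x then 1 else 0)
    + (if 0 < yc ∧ yc-1 = y ∧ xc = x then 1 else 0)
    + (if yc < sy-1 ∧ 0 < xc ∧ yc+1 = y ∧ xc-1 = x then 1 else 0)
    + (if yc < sy-1 ∧ xc < sx-1 ∧ yc+1 = y ∧ xc+1 = x then 1 else 0)
    + (if yc < sy-1 ∧ yc+1 = y ∧ xc = x then 1 else 0)
    + (if 0 < xc ∧ yc = y ∧ xc-1 = x then 1 else 0)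
    + (if xc < sx-1 ∧ yc = y ∧ xc+1 = x then 1 else 0)
  else (if yc = y ∧ xc = x then 10 else 0)

def pvTen (yc xc : Nat) (s : String) (y x : Nat) : Int :=
  if ¬(s == "@") ∧ yc = y ∧ xc = x then 10 else 0

theorem length_bump (g : List (List Int)) (a b : Nat) (d : Int) :
    (pvBump g a b d).length = g.length := by simp [pvBump]

theorem rowlen_bump (g : List (List Int)) (a b : Nat) (d : Int) (y : Nat) :
    ((pvBump g a b d).getD y []).length = (g.getD y []).length := by
  simp only [pvBump, List.getD_eq_getElem?_getD, List.getElem?_modify]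
  cases h : g[y]? <;> by_cases hay : a = y <;> simp [hay, h]

theorem val_bump (g : List (List Int)) (a b y x : Nat) (d : Int) :
    pvVal (pvBump g a b d) y x
      = pvVal g y x + (if a = y ∧ b = x ∧ y < g.length ∧ x < (g.getD y []).length then d else 0) := by
  simp only [pvVal, pvBump, List.getD_eq_getElem?_getD, List.getElem?_modify]
  by_cases hay : a = y
  · subst hay
    cases h : g[a]? with
    | none =>
      have : ¬ a < g.length := by simpa [List.getElem?_eq_none_iff] using h
      simp [h, this]
    | some row =>
      have hy : a < g.length := (List.getElem?_eq_some_iff.mp h).1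
      simp only [h, Option.map_some, Option.getD_some, List.getElem?_modify]
      by_cases hbx : b = x
      · subst hbx
        cases h2 : row[b]? with
        | none =>
          have : ¬ b < row.length := by simpa [List.getElem?_eq_none_iff] using h2
          simp [h2, this, hy, List.getD_eq_getElem?_getD, h]
        | some v =>
          have hx : b < row.length := (List.getElem?_eq_some_iff.mp h2).1
          obtain ⟨_, rfl⟩ := List.getElem?_eq_some_iff.mp h2
          simp [h2, hy, hx, List.getD_eq_getElem?_getD, h, add_comm]
      · simp [hbx, List.getD_eq_getElem?_getD]
  · simp [hay, List.getD_eq_getElem?_getD]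

theorem length_gbump (c : Prop) [Decidable c] (g : List (List Int)) (a b : Nat) (d : Int) :
    (if c then pvBump g a b d else g).length = g.length := by
  split_ifs <;> simp only [length_bump]

theorem rowlen_gbump (c : Prop) [Decidable c] (g : List (List Int)) (a b : Nat) (d : Int) (y : Nat) :
    ((if c then pvBump g a b d else g).getD y []).length = (g.getD y []).length := by
  split_ifs <;> simp only [rowlen_bump]

theorem val_gbump (c : Prop) [Decidable c] (g : List (List Int)) (a b y x : Nat) (d : Int) :
    pvVal (if c then pvBump g a b d else g) y x
      = pvVal g y x + (if c ∧ a = y ∧ b = x ∧ y < g.length ∧ x < (g.getD y []).length then d else 0) := by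
  by_cases hc : c
  · simp only [hc, if_true, val_bump, true_and]
  · simp [hc]

theorem shape_step (sy sx : Nat) (g : List (List Int)) (yc xc : Nat) (s : String)
    (h : pvShape sy sx g) : pvShape sy sx (pvStepAt sy sx g yc xc s) := by
  obtain ⟨h1, h2⟩ := h
  unfold pvStepAt
  split_ifs <;>
    exact ⟨by simp only [length_bump]; exact h1, fun i hi => by simp only [rowlen_bump]; exact h2 i hi⟩

theorem val_step (sy sx : Nat) (g : List (List Int)) (yc xc : Nat) (s : String)
    (h : pvShape sy sx g) (hyc : yc < sy) (hxc : xc < sx) (y x : Nat) (hy : y < sy) (hx : x < sx) :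
    pvVal (pvStepAt sy sx g yc xc s) y x = pvVal g y x + pvContrib sy sx yc xc s y x := by
  obtain ⟨h1, h2⟩ := h
  unfold pvStepAt pvContrib
  by_cases hs : s == "@" <;> simp only [hs, if_true, if_false, Bool.false_eq_true]
  · by_cases ha : 0 < yc <;> by_cases hb : yc < sy - 1 <;>
      simp only [ha, hb, if_true, if_false] <;>
      simp only [val_gbump, val_bump, length_gbump, length_bump, rowlen_gbump, rowlen_bump,
        h1, h2 y hy, hy, hx, and_true, true_and, false_and, if_false, add_zero] <;>
      ring
  · simp only [val_bump, h1, h2 y hy, hy, hx, and_true]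

theorem foldl_inner (sy sx yc : Nat) (hyc : yc < sy) :
    ∀ (l : List (String × Nat)), (∀ q ∈ l, q.2 < sx) → ∀ g, pvShape sy sx g →
      pvShape sy sx (l.foldl (fun g' q => pvStepAt sy sx g' yc q.2 q.1) g) ∧
      (∀ y, y < sy → ∀ x, x < sx →
        pvVal (l.foldl (fun g' q => pvStepAt sy sx g' yc q.2 q.1) g) y x
          = pvVal g y x + (l.map (fun q => pvContrib sy sx yc q.2 q.1 y x)).sum) := by
  intro l
  induction l with
  | nil => intro _ g hg; exact ⟨hg, fun y hy x hx => by simp⟩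
  | cons q l ih =>
    intro hmem g hg
    have hq : q.2 < sx := hmem q (List.mem_cons_self ..)
    have hstep := shape_step sy sx g yc q.2 q.1 hg
    obtain ⟨hsh, hval⟩ := ih (fun r hr => hmem r (List.mem_cons_of_mem _ hr)) _ hstep
    refine ⟨hsh, fun y hy x hx => ?_⟩
    rw [List.foldl_cons] at *
    rw [hval y hy x hx, val_step sy sx g yc q.2 q.1 hg hyc hq y x hy hx]
    simp [add_assoc]

theorem foldl_outer (sy sx : Nat) :
    ∀ (L : List (List String × Nat)), (∀ p ∈ L, p.2 < sy ∧ p.1.length ≤ sx) → ∀ g, pvShape sy sx g →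
      pvShape sy sx (L.foldl (fun g p => (p.1.zipIdx).foldl (fun g' q => pvStepAt sy sx g' p.2 q.2 q.1) g) g) ∧
      (∀ y, y < sy → ∀ x, x < sx →
        pvVal (L.foldl (fun g p => (p.1.zipIdx).foldl (fun g' q => pvStepAt sy sx g' p.2 q.2 q.1) g) g) y x
          = pvVal g y x + (L.map (fun p => ((p.1.zipIdx).map (fun q => pvContrib sy sx p.2 q.2 q.1 y x)).sum)).sum) := by
  intro L
  induction L with
  | nil => intro _ g hg; exact ⟨hg, fun y hy x hx => by simp⟩
  | cons p L ih =>
    intro hmem g hg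
    obtain ⟨hpy, hpl⟩ := hmem p (List.mem_cons_self ..)
    have hql : ∀ q ∈ p.1.zipIdx, (q : String × Nat).2 < sx := by
      intro q hq
      obtain ⟨a, b⟩ := q
      have := List.mem_zipIdx hq
      omega
    have hin := foldl_inner sy sx p.2 hpy p.1.zipIdx hql g hg
    obtain ⟨hsh, hval⟩ := ih (fun r hr => hmem r (List.mem_cons_of_mem _ hr)) _ hin.1
    refine ⟨hsh, fun y hy x hx => ?_⟩
    rw [List.foldl_cons] at *
    rw [hval y hy x hx, hin.2 y hy x hx]
    simp [add_assoc]

theorem sum_zipIdx_map {α : Type} (d : α) (f : Nat → α → Int) :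
    ∀ (l : List α) (k : Nat),
      ((l.zipIdx k).map (fun q => f q.2 q.1)).sum = ∑ i ∈ Finset.range l.length, f (k + i) (l.getD i d) := by
  intro l
  induction l with
  | nil => simp
  | cons a l ih =>
    intro k
    rw [List.zipIdx_cons]
    simp only [List.map_cons, List.sum_cons, ih (k + 1), List.length_cons, Finset.sum_range_succ']
    rw [Finset.sum_congr rfl (fun i _ => by congr 1; omega :
      ∀ i ∈ Finset.range l.length, f (k + 1 + i) (l.getD i d) = f (k + (i + 1)) ((a :: l).getD (i + 1) d))]
    simp [add_comm]

theorem shape_init (sy sx : Nat) : pvShape sy sx (List.replicate sy (List.replicate sx (0 : Int))) := by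
  refine ⟨by simp, fun i hi => ?_⟩
  rw [List.getD_eq_getElem _ _ (by simpa using hi)]
  simp

theorem val_init (sy sx y x : Nat) : pvVal (List.replicate sy (List.replicate sx (0 : Int))) y x = 0 := by
  simp only [pvVal, List.getD_eq_getElem?_getD, List.getElem?_replicate]
  split_ifs <;> simp

theorem sum_extend (n m : Nat) (h : n ≤ m) (f : Nat → Int) :
    (∑ i ∈ Finset.range n, f i) = ∑ i ∈ Finset.range m, if i < n then f i else 0 := by
  induction m with
  | zero =>
    have hn : n = 0 := by omega
    subst hn; simp
  | succ m ih =>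
    by_cases hnm : n ≤ m
    · rw [Finset.sum_range_succ (f := fun i => if i < n then f i else 0), ← ih hnm,
        if_neg (by omega), add_zero]
    · have hn : n = m + 1 := by omega
      subst hn
      exact Finset.sum_congr rfl (fun i hi => (if_pos (Finset.mem_range.mp hi)).symm)

theorem val_A (vg : List (List String))
    (hrect : ∀ row ∈ vg, row.length ≤ (vg.headD []).length) :
    pvShape vg.length (vg.headD []).length (calculate_space_count vg) ∧
    (∀ y, y < vg.length → ∀ x, x < (vg.headD []).length →
      pvVal (calculate_space_count vg) y x
        = ∑ yc ∈ Finset.range vg.length, ∑ xc ∈ Finset.range (vg.headD []).length,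
            (if xc < (vg.getD yc []).length then
              pvContrib vg.length (vg.headD []).length yc xc ((vg.getD yc []).getD xc "") y x
             else 0)) := by
  have hmem : ∀ p ∈ vg.zipIdx, (p : List String × Nat).2 < vg.length ∧ p.1.length ≤ (vg.headD []).length := by
    intro p hp
    obtain ⟨row, i⟩ := p
    obtain ⟨-, hi, hrow⟩ := List.mem_zipIdx hp
    refine ⟨by omega, ?_⟩
    simp only [hrow]
    exact hrect _ (List.getElem_mem _)
  obtain ⟨hsh, hval⟩ := foldl_outer vg.length (vg.headD []).length vg.zipIdx hmem
    (List.replicate vg.length (List.replicate (vg.headD []).length (0 : Int)))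
    (shape_init _ _)
  refine ⟨hsh, fun y hy x hx => ?_⟩
  rw [show calculate_space_count vg = (vg.zipIdx).foldl
      (fun g p => (p.1.zipIdx).foldl (fun g' q => pvStepAt vg.length (vg.headD []).length g' p.2 q.2 q.1) g)
      (List.replicate vg.length (List.replicate (vg.headD []).length (0 : Int))) from rfl]
  rw [hval y hy x hx, val_init, zero_add]
  rw [sum_zipIdx_map ([] : List String)
      (fun i row => ((row.zipIdx).map (fun q => pvContrib vg.length (vg.headD []).length i q.2 q.1 y x)).sum) vg 0]
  refine Finset.sum_congr rfl (fun yc hyc => ?_)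
  rw [sum_zipIdx_map ("" : String) (fun j s => pvContrib vg.length (vg.headD []).length (0 + yc) j s y x) _ 0]
  have hle : (vg.getD yc []).length ≤ (vg.headD []).length := by
    rw [List.getD_eq_getElem _ _ (by simpa using Finset.mem_range.mp hyc)]
    exact hrect _ (List.getElem_mem _)
  rw [sum_extend _ _ hle]
  exact Finset.sum_congr rfl (fun xc _ => by norm_num)

theorem mem_marks (vg : List (List String)) (u v : Int) :
    ((u, v) ∈ pvMarks vg) ↔
      (0 ≤ u ∧ u.toNat < vg.length ∧ 0 ≤ v ∧ v.toNat < (vg.getD u.toNat []).length ∧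
        (vg.getD u.toNat []).getD v.toNat "" = "@") := by
  unfold pvMarks
  rw [PySem.Set.mem_ofList]
  simp only [List.mem_flatMap, List.mem_filterMap, List.mem_zipIdx_iff_getElem?]
  constructor
  · rintro ⟨⟨row, yc⟩, hrow, ⟨s, xc⟩, hcell, hif⟩
    by_cases hs : s == "@"
    · rw [if_pos hs] at hif
      have h := Option.some.inj hif
      have hu : ((yc : Int)) = u := congrArg Prod.fst h
      have hv : ((xc : Int)) = v := congrArg Prod.snd h
      subst hu; subst hv
      obtain ⟨hyl, hrow'⟩ := List.getElem?_eq_some_iff.mp hrow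
      obtain ⟨hxl, hcell'⟩ := List.getElem?_eq_some_iff.mp hcell
      have hgd : vg.getD (((yc : Int)).toNat) [] = row := by
        simp only [Int.toNat_natCast]
        rw [List.getD_eq_getElem _ _ hyl, hrow']
      refine ⟨Int.natCast_nonneg yc, by simpa using hyl, Int.natCast_nonneg xc, ?_, ?_⟩
      · rw [hgd]; simpa using hxl
      · rw [hgd]
        simp only [Int.toNat_natCast]
        rw [List.getD_eq_getElem _ _ hxl, hcell']
        exact beq_iff_eq.mp hs
    · rw [if_neg hs] at hif
      exact absurd hif (by simp)
  · rintro ⟨hu0, hulen, hv0, hvlen, hcell⟩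
    refine ⟨(vg.getD u.toNat [], u.toNat), ?_, ((vg.getD u.toNat []).getD v.toNat "", v.toNat), ?_, ?_⟩
    · simp only []
      rw [List.getD_eq_getElem _ _ hulen, List.getElem?_eq_getElem hulen]
    · simp only []
      rw [List.getD_eq_getElem _ _ hvlen, List.getElem?_eq_getElem hvlen]
    · rw [if_pos (by simpa using hcell)]
      simp [Int.toNat_of_nonneg hu0, Int.toNat_of_nonneg hv0]

theorem glue (vg : List (List String)) (sx y x : Nat) (hy : y < vg.length) (hx : x < sx)
    (hrect : ∀ row ∈ vg, row.length ≤ sx)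
    (dy dx : Int) (P : Nat → Nat → Prop) [∀ yc xc, Decidable (P yc xc)]
    (hP : ∀ yc xc, yc < vg.length → xc < sx → (P yc xc ↔ ((yc : Int) = ↑y + dy ∧ (xc : Int) = ↑x + dx))) :
    (∑ yc ∈ Finset.range vg.length, ∑ xc ∈ Finset.range sx,
        if ((vg.getD yc []).getD xc "" == "@") ∧ P yc xc then (1 : Int) else 0)
      = if (pvMarks vg).contains (↑y + dy, ↑x + dx) then 1 else 0 := by
  have hcm : (pvMarks vg).contains (↑y + dy, ↑x + dx) = true ↔ ((↑y + dy, ↑x + dx) ∈ pvMarks vg) :=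
    List.contains_iff
  by_cases hb : 0 ≤ ↑y + dy ∧ ↑y + dy < ((vg.length : Int)) ∧ 0 ≤ ↑x + dx ∧ ↑x + dx < ((sx : Int))
  · rw [Finset.sum_eq_single_of_mem (↑y + dy).toNat (Finset.mem_range.mpr (by omega))
      (fun yc hyc hne => Finset.sum_eq_zero (fun xc hxc => by
        rw [if_neg]
        rintro ⟨-, hp⟩
        rw [hP yc xc (Finset.mem_range.mp hyc) (Finset.mem_range.mp hxc)] at hp
        omega))]
    rw [Finset.sum_eq_single_of_mem (↑x + dx).toNat (Finset.mem_range.mpr (by omega))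
      (fun xc hxc hne => by
        rw [if_neg]
        rintro ⟨-, hp⟩
        rw [hP _ xc (by omega) (Finset.mem_range.mp hxc)] at hp
        omega)]
    by_cases hc : (vg.getD (↑y + dy).toNat []).getD (↑x + dx).toNat "" == "@"
    · have hl : (↑x + dx).toNat < (vg.getD (↑y + dy).toNat []).length := by
        by_contra hnl
        rw [List.getD_eq_default _ _ (by omega)] at hc
        simp at hc
      have hmem : ((↑y + dy, ↑x + dx) : Int × Int) ∈ pvMarks vg :=
        (mem_marks vg _ _).mpr ⟨by omega, by omega, by omega, hl, by simpa using hc⟩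
      rw [if_pos ⟨hc, (hP _ _ (by omega) (by omega)).mpr (by omega)⟩, if_pos (hcm.mpr hmem)]
    · have hnm : ¬ ((↑y + dy, ↑x + dx) : Int × Int) ∈ pvMarks vg := by
        intro hm
        obtain ⟨-, -, -, -, hcell⟩ := (mem_marks vg _ _).mp hm
        exact hc (by simpa using hcell)
      rw [if_neg (fun h => hc h.1), if_neg (fun h => hnm (hcm.mp h))]
  · have hnm : ¬ ((↑y + dy, ↑x + dx) : Int × Int) ∈ pvMarks vg := by
      intro hm
      obtain ⟨h1, h2, h3, h4, -⟩ := (mem_marks vg _ _).mp hm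
      have hle : (vg.getD (↑y + dy).toNat []).length ≤ sx := by
        rw [List.getD_eq_getElem _ _ h2]
        exact hrect _ (List.getElem_mem _)
      exact hb ⟨h1, by omega, h3, by omega⟩
    rw [if_neg (fun h => hnm (hcm.mp h))]
    refine Finset.sum_eq_zero (fun yc hyc => Finset.sum_eq_zero (fun xc hxc => ?_))
    rw [if_neg]
    rintro ⟨-, hp⟩
    have h1 := Finset.mem_range.mp hyc
    have h2 := Finset.mem_range.mp hxc
    rw [hP yc xc h1 h2] at hp
    exact hb ⟨by omega, by omega, by omega, by omega⟩

theorem sum_ten (vg : List (List String)) (sy sx y x : Nat) (hy : y < sy) (hx : x < sx) :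
    (∑ yc ∈ Finset.range sy, ∑ xc ∈ Finset.range sx,
        if xc < (vg.getD yc []).length ∧ ¬((vg.getD yc []).getD xc "" == "@") ∧ yc = y ∧ xc = x
        then (10 : Int) else 0)
      = if x < (vg.getD y []).length ∧ ¬((vg.getD y []).getD x "" == "@") then 10 else 0 := by
  rw [Finset.sum_eq_single_of_mem y (Finset.mem_range.mpr hy)
    (fun yc _ hne => Finset.sum_eq_zero (fun xc _ => by rw [if_neg]; rintro ⟨-, -, h, -⟩; omega))]
  rw [Finset.sum_eq_single_of_mem x (Finset.mem_range.mpr hx)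
    (fun xc _ hne => by rw [if_neg]; rintro ⟨-, -, -, h⟩; omega)]
  by_cases hc : x < (vg.getD y []).length ∧ ¬((vg.getD y []).getD x "" == "@")
  · rw [if_pos ⟨hc.1, hc.2, rfl, rfl⟩, if_pos hc]
  · rw [if_neg (fun h => hc ⟨h.1, h.2.1⟩), if_neg hc]

theorem contrib_pointwise (sy sx yc xc y x : Nat) (s : String) :
    pvContrib sy sx yc xc s y x
      = (if (s == "@") ∧ 0 < yc ∧ 0 < xc ∧ yc-1 = y ∧ xc-1 = x then 1 else 0)
      + (if (s == "@") ∧ 0 < yc ∧ xc < sx-1 ∧ yc-1 = y ∧ xc+1 = x then 1 else 0)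
      + (if (s == "@") ∧ 0 < yc ∧ yc-1 = y ∧ xc = x then 1 else 0)
      + (if (s == "@") ∧ yc < sy-1 ∧ 0 < xc ∧ yc+1 = y ∧ xc-1 = x then 1 else 0)
      + (if (s == "@") ∧ yc < sy-1 ∧ xc < sx-1 ∧ yc+1 = y ∧ xc+1 = x then 1 else 0)
      + (if (s == "@") ∧ yc < sy-1 ∧ yc+1 = y ∧ xc = x then 1 else 0)
      + (if (s == "@") ∧ 0 < xc ∧ yc = y ∧ xc-1 = x then 1 else 0)
      + (if (s == "@") ∧ xc < sx-1 ∧ yc = y ∧ xc+1 = x then 1 else 0)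
      + (if ¬(s == "@") ∧ yc = y ∧ xc = x then 10 else 0) := by
  unfold pvContrib
  by_cases hs : s == "@" <;>
    simp [hs, true_and, false_and, if_false, add_zero, not_true, not_false_iff]

theorem contrib_pointwise_g (vg : List (List String)) (sy sx yc xc y x : Nat) :
    (if xc < (vg.getD yc []).length then
        pvContrib sy sx yc xc ((vg.getD yc []).getD xc "") y x else 0)
      = (if ((vg.getD yc []).getD xc "" == "@") ∧ 0 < yc ∧ 0 < xc ∧ yc-1 = y ∧ xc-1 = x then 1 else 0)
      + (if ((vg.getD yc []).getD xc "" == "@") ∧ 0 < yc ∧ xc < sx-1 ∧ yc-1 = y ∧ xc+1 = x then 1 else 0)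
      + (if ((vg.getD yc []).getD xc "" == "@") ∧ 0 < yc ∧ yc-1 = y ∧ xc = x then 1 else 0)
      + (if ((vg.getD yc []).getD xc "" == "@") ∧ yc < sy-1 ∧ 0 < xc ∧ yc+1 = y ∧ xc-1 = x then 1 else 0)
      + (if ((vg.getD yc []).getD xc "" == "@") ∧ yc < sy-1 ∧ xc < sx-1 ∧ yc+1 = y ∧ xc+1 = x then 1 else 0)
      + (if ((vg.getD yc []).getD xc "" == "@") ∧ yc < sy-1 ∧ yc+1 = y ∧ xc = x then 1 else 0)
      + (if ((vg.getD yc []).getD xc "" == "@") ∧ 0 < xc ∧ yc = y ∧ xc-1 = x then 1 else 0)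
      + (if ((vg.getD yc []).getD xc "" == "@") ∧ xc < sx-1 ∧ yc = y ∧ xc+1 = x then 1 else 0)
      + (if xc < (vg.getD yc []).length ∧ ¬((vg.getD yc []).getD xc "" == "@") ∧ yc = y ∧ xc = x
         then 10 else 0) := by
  by_cases hex : xc < (vg.getD yc []).length
  · rw [if_pos hex, contrib_pointwise]
    congr 1
    exact if_congr (by tauto) rfl rfl
  · rw [if_neg hex]
    have hcell : (vg.getD yc []).getD xc "" = "" := List.getD_eq_default _ _ (by omega)
    simp only [hcell]
    simp
    intro h
    exact absurd h (by simpa [List.getD_eq_getElem?_getD] using hex)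

theorem bridge (vg : List (List String)) (y x : Nat) (hy : y < vg.length)
    (hx : x < (vg.headD []).length)
    (hrect : ∀ row ∈ vg, row.length ≤ (vg.headD []).length) :
    (∑ yc ∈ Finset.range vg.length, ∑ xc ∈ Finset.range (vg.headD []).length,
        if xc < (vg.getD yc []).length then
          pvContrib vg.length (vg.headD []).length yc xc ((vg.getD yc []).getD xc "") y x else 0)
      = ((if (pvMarks vg).contains (↑y + 1, ↑x + 1) then 1 else 0)
        + (if (pvMarks vg).contains (↑y + 1, ↑x + -1) then 1 else 0)
        + (if (pvMarks vg).contains (↑y + 1, ↑x + 0) then 1 else 0)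
        + (if (pvMarks vg).contains (↑y + -1, ↑x + 1) then 1 else 0)
        + (if (pvMarks vg).contains (↑y + -1, ↑x + -1) then 1 else 0)
        + (if (pvMarks vg).contains (↑y + -1, ↑x + 0) then 1 else 0)
        + (if (pvMarks vg).contains (↑y + 0, ↑x + 1) then 1 else 0)
        + (if (pvMarks vg).contains (↑y + 0, ↑x + -1) then 1 else 0))
        + (if x < (vg.getD y []).length ∧ ¬((vg.getD y []).getD x "" == "@") then 10 else 0) := by
  rw [Finset.sum_congr rfl (fun yc _ => Finset.sum_congr rfl (fun xc _ =>
    contrib_pointwise_g vg vg.length (vg.headD []).length yc xc y x))]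
  simp only [Finset.sum_add_distrib]
  rw [glue vg (vg.headD []).length y x hy hx hrect 1 1 (fun yc xc => 0 < yc ∧ 0 < xc ∧ yc-1 = y ∧ xc-1 = x)
      (fun yc xc h1 h2 => by omega),
    glue vg (vg.headD []).length y x hy hx hrect 1 (-1) (fun yc xc => 0 < yc ∧ xc < (vg.headD []).length-1 ∧ yc-1 = y ∧ xc+1 = x)
      (fun yc xc h1 h2 => by omega),
    glue vg (vg.headD []).length y x hy hx hrect 1 0 (fun yc xc => 0 < yc ∧ yc-1 = y ∧ xc = x)
      (fun yc xc h1 h2 => by omega),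
    glue vg (vg.headD []).length y x hy hx hrect (-1) 1 (fun yc xc => yc < vg.length-1 ∧ 0 < xc ∧ yc+1 = y ∧ xc-1 = x)
      (fun yc xc h1 h2 => by omega),
    glue vg (vg.headD []).length y x hy hx hrect (-1) (-1) (fun yc xc => yc < vg.length-1 ∧ xc < (vg.headD []).length-1 ∧ yc+1 = y ∧ xc+1 = x)
      (fun yc xc h1 h2 => by omega),
    glue vg (vg.headD []).length y x hy hx hrect (-1) 0 (fun yc xc => yc < vg.length-1 ∧ yc+1 = y ∧ xc = x)
      (fun yc xc h1 h2 => by omega),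
    glue vg (vg.headD []).length y x hy hx hrect 0 1 (fun yc xc => 0 < xc ∧ yc = y ∧ xc-1 = x)
      (fun yc xc h1 h2 => by omega),
    glue vg (vg.headD []).length y x hy hx hrect 0 (-1) (fun yc xc => xc < (vg.headD []).length-1 ∧ yc = y ∧ xc+1 = x)
      (fun yc xc h1 h2 => by omega),
    sum_ten vg vg.length (vg.headD []).length y x hy hx]

theorem count_expand (vg : List (List String)) (y x : Nat) :
    pvDeltas.foldl (fun acc d =>
        acc + (if (pvMarks vg).contains ((y : Int) + d.1, (x : Int) + d.2) then 1 else 0)) (0 : Int)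
      = (if (pvMarks vg).contains (↑y + 1, ↑x + 1) then 1 else 0)
        + (if (pvMarks vg).contains (↑y + 1, ↑x + -1) then 1 else 0)
        + (if (pvMarks vg).contains (↑y + 1, ↑x + 0) then 1 else 0)
        + (if (pvMarks vg).contains (↑y + -1, ↑x + 1) then 1 else 0)
        + (if (pvMarks vg).contains (↑y + -1, ↑x + -1) then 1 else 0)
        + (if (pvMarks vg).contains (↑y + -1, ↑x + 0) then 1 else 0)
        + (if (pvMarks vg).contains (↑y + 0, ↑x + 1) then 1 else 0)
        + (if (pvMarks vg).contains (↑y + 0, ↑x + -1) then 1 else 0) := by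
  simp only [pvDeltas, List.foldl_cons, List.foldl_nil, zero_add]
  ring

-- the gather grid before the +10 pass
def pvGrid0 (vg : List (List String)) : List (List Int) :=
  (List.range vg.length).map (fun (y : Nat) =>
    (List.range (vg.headD []).length).map (fun (x : Nat) =>
      pvDeltas.foldl (fun acc d =>
        acc + (if (pvMarks vg).contains ((y : Int) + d.1, (x : Int) + d.2) then 1 else 0)) (0 : Int)))

theorem shape_grid0 (vg : List (List String)) :
    pvShape vg.length (vg.headD []).length (pvGrid0 vg) := by
  refine ⟨by simp [pvGrid0], fun i hi => ?_⟩
  rw [List.getD_eq_getElem _ _ (by simpa [pvGrid0] using hi)]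
  simp [pvGrid0]

theorem val_grid0 (vg : List (List String)) (y x : Nat)
    (hy : y < vg.length) (hx : x < (vg.headD []).length) :
    pvVal (pvGrid0 vg) y x
      = pvDeltas.foldl (fun acc d =>
          acc + (if (pvMarks vg).contains ((y : Int) + d.1, (x : Int) + d.2) then 1 else 0)) (0 : Int) := by
  have hx' : x < (vg.head?.getD []).length := by simpa [List.headD_eq_head?_getD] using hx
  unfold pvVal pvGrid0
  simp [List.getD_eq_getElem?_getD, List.getElem?_map, List.getElem?_range, hy, hx, hx',
    List.getElem?_eq_getElem]

theorem foldl_inner_ten (sy sx yc : Nat) (hyc : yc < sy) :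
    ∀ (l : List (String × Nat)), (∀ q ∈ l, q.2 < sx) → ∀ g, pvShape sy sx g →
      pvShape sy sx (l.foldl (fun g' q => if q.1 ≠ "@" then pvBump g' yc q.2 10 else g') g) ∧
      (∀ y, y < sy → ∀ x, x < sx →
        pvVal (l.foldl (fun g' q => if q.1 ≠ "@" then pvBump g' yc q.2 10 else g') g) y x
          = pvVal g y x + (l.map (fun q => pvTen yc q.2 q.1 y x)).sum) := by
  intro l
  induction l with
  | nil => intro _ g hg; exact ⟨hg, fun y hy x hx => by simp⟩
  | cons q l ih =>
    intro hmem g hg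
    have hq : q.2 < sx := hmem q (List.mem_cons_self ..)
    have hstep : pvShape sy sx (if q.1 ≠ "@" then pvBump g yc q.2 10 else g) := by
      obtain ⟨h1, h2⟩ := hg
      refine ⟨by simp only [length_gbump]; exact h1, fun i hi => by simp only [rowlen_gbump]; exact h2 i hi⟩
    obtain ⟨hsh, hval⟩ := ih (fun r hr => hmem r (List.mem_cons_of_mem _ hr)) _ hstep
    refine ⟨hsh, fun y hy x hx => ?_⟩
    rw [List.foldl_cons] at *
    rw [hval y hy x hx]
    have hv : pvVal (if q.1 ≠ "@" then pvBump g yc q.2 10 else g) y x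
        = pvVal g y x + pvTen yc q.2 q.1 y x := by
      rw [val_gbump]
      unfold pvTen
      obtain ⟨h1, h2⟩ := hg
      simp only [h1, h2 y hy, hy, hx, and_true]
      congr 1
      exact if_congr (by simp) rfl rfl
    rw [hv]
    simp [add_assoc]

theorem foldl_outer_ten (sy sx : Nat) :
    ∀ (L : List (List String × Nat)), (∀ p ∈ L, p.2 < sy ∧ p.1.length ≤ sx) → ∀ g, pvShape sy sx g →
      pvShape sy sx (L.foldl (fun g p => (p.1.zipIdx).foldl (fun g' q => if q.1 ≠ "@" then pvBump g' p.2 q.2 10 else g') g) g) ∧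
      (∀ y, y < sy → ∀ x, x < sx →
        pvVal (L.foldl (fun g p => (p.1.zipIdx).foldl (fun g' q => if q.1 ≠ "@" then pvBump g' p.2 q.2 10 else g') g) g) y x
          = pvVal g y x + (L.map (fun p => ((p.1.zipIdx).map (fun q => pvTen p.2 q.2 q.1 y x)).sum)).sum) := by
  intro L
  induction L with
  | nil => intro _ g hg; exact ⟨hg, fun y hy x hx => by simp⟩
  | cons p L ih =>
    intro hmem g hg
    obtain ⟨hpy, hpl⟩ := hmem p (List.mem_cons_self ..)
    have hql : ∀ q ∈ p.1.zipIdx, (q : String × Nat).2 < sx := by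
      intro q hq
      obtain ⟨a, b⟩ := q
      have := List.mem_zipIdx hq
      omega
    have hin := foldl_inner_ten sy sx p.2 hpy p.1.zipIdx hql g hg
    obtain ⟨hsh, hval⟩ := ih (fun r hr => hmem r (List.mem_cons_of_mem _ hr)) _ hin.1
    refine ⟨hsh, fun y hy x hx => ?_⟩
    rw [List.foldl_cons] at *
    rw [hval y hy x hx, hin.2 y hy x hx]
    simp [add_assoc]

theorem sum_ten' (vg : List (List String)) (y x : Nat) (hy : y < vg.length) :
    (∑ yc ∈ Finset.range vg.length, ∑ xc ∈ Finset.range (vg.getD yc []).length,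
        pvTen yc xc ((vg.getD yc []).getD xc "") y x)
      = if x < (vg.getD y []).length ∧ ¬((vg.getD y []).getD x "" == "@") then 10 else 0 := by
  rw [Finset.sum_eq_single_of_mem y (Finset.mem_range.mpr hy)
    (fun yc _ hne => Finset.sum_eq_zero (fun xc _ => by
      unfold pvTen; rw [if_neg]; rintro ⟨-, h, -⟩; omega))]
  by_cases hxl : x < (vg.getD y []).length
  · rw [Finset.sum_eq_single_of_mem x (Finset.mem_range.mpr hxl)
      (fun xc _ hne => by unfold pvTen; rw [if_neg]; rintro ⟨-, -, h⟩; omega)]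
    unfold pvTen
    by_cases hc : ¬((vg.getD y []).getD x "" == "@")
    · rw [if_pos ⟨hc, rfl, rfl⟩, if_pos ⟨hxl, hc⟩]
    · rw [if_neg (by tauto), if_neg (by tauto)]
  · rw [if_neg (by tauto)]
    refine Finset.sum_eq_zero (fun xc hxc => ?_)
    unfold pvTen
    rw [if_neg]
    rintro ⟨-, -, h⟩
    exact hxl (h ▸ Finset.mem_range.mp hxc)

theorem val_B (vg : List (List String))
    (hrect : ∀ row ∈ vg, row.length ≤ (vg.headD []).length) :
    pvShape vg.length (vg.headD []).length (calculate_space_count_alt vg) ∧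
    (∀ y, y < vg.length → ∀ x, x < (vg.headD []).length →
      pvVal (calculate_space_count_alt vg) y x
        = pvVal (pvGrid0 vg) y x
          + (if x < (vg.getD y []).length ∧ ¬((vg.getD y []).getD x "" == "@") then 10 else 0)) := by
  have hmem : ∀ p ∈ vg.zipIdx, (p : List String × Nat).2 < vg.length ∧ p.1.length ≤ (vg.headD []).length := by
    intro p hp
    obtain ⟨row, i⟩ := p
    obtain ⟨-, hi, hrow⟩ := List.mem_zipIdx hp
    refine ⟨by omega, ?_⟩
    simp only [hrow]
    exact hrect _ (List.getElem_mem _)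
  obtain ⟨hsh, hval⟩ := foldl_outer_ten vg.length (vg.headD []).length vg.zipIdx hmem
    (pvGrid0 vg) (shape_grid0 vg)
  have halt : calculate_space_count_alt vg
      = (vg.zipIdx).foldl (fun g p => (p.1.zipIdx).foldl
          (fun g' q => if q.1 ≠ "@" then pvBump g' p.2 q.2 10 else g') g) (pvGrid0 vg) := rfl
  refine ⟨halt ▸ hsh, fun y hy x hx => ?_⟩
  rw [halt, hval y hy x hx]
  congr 1
  rw [sum_zipIdx_map ([] : List String)
      (fun i row => ((row.zipIdx).map (fun q => pvTen i q.2 q.1 y x)).sum) vg 0]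
  rw [← sum_ten' vg y x hy]
  refine Finset.sum_congr rfl (fun yc hyc => ?_)
  rw [sum_zipIdx_map ("" : String) (fun j s => pvTen (0 + yc) j s y x) _ 0]
  exact Finset.sum_congr rfl (fun xc _ => by norm_num)

theorem main_eq (vg : List (List String))
    (hrect : ∀ row ∈ vg, row.length ≤ (vg.headD []).length) :
    calculate_space_count vg = calculate_space_count_alt vg := by
  obtain ⟨hshA, hvalA⟩ := val_A vg hrect
  obtain ⟨hshB, hvalB⟩ := val_B vg hrect
  apply List.ext_getElem (by rw [hshA.1, hshB.1])
  intro y hy1 hy2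
  have hy : y < vg.length := by rwa [hshA.1] at hy1
  have hrowA : ((calculate_space_count vg).getD y []).length = (vg.headD []).length := hshA.2 y hy
  have hrowB : ((calculate_space_count_alt vg).getD y []).length = (vg.headD []).length := hshB.2 y hy
  apply List.ext_getElem (by
    rw [← List.getD_eq_getElem (calculate_space_count vg) ([] : List Int) hy1,
        ← List.getD_eq_getElem (calculate_space_count_alt vg) ([] : List Int) hy2,
        hrowA, hrowB])
  intro x hx1 hx2
  have hx : x < (vg.headD []).length := by
    rw [← List.getD_eq_getElem (calculate_space_count vg) ([] : List Int) hy1] at hx1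
    rwa [hrowA] at hx1
  have eA : (calculate_space_count vg)[y][x] = pvVal (calculate_space_count vg) y x := by
    unfold pvVal
    rw [List.getD_eq_getElem _ _ hy1, List.getD_eq_getElem _ _ hx1]
  have eB : (calculate_space_count_alt vg)[y][x] = pvVal (calculate_space_count_alt vg) y x := by
    unfold pvVal
    rw [List.getD_eq_getElem _ _ hy2]
    rw [List.getD_eq_getElem _ _ hx2]
  rw [eA, eB, hvalA y hy x hx, bridge vg y x hy hx hrect,
    hvalB y hy x hx, val_grid0 vg y x hy hx, count_expand]

-- ===== VERDICT (by name: the statement is the Claim_ definition above) =====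
theorem calculate_space_count_spec : Claim_equal_calculate_space_count := by
  intro visual_grid _ hpre
  unfold Spec_calculate_space_count
  exact main_eq visual_grid hpre.2
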